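-- pv_equiv track=rewrite | github.com/aservet1/jRAPL | src/extra/ThreadComparison/scripts/zero-reading-interval.py | get_zero_intervals
-- ===== SOURCE A (Python) =====
-- def get_zero_intervals(data):
-- 	zero_intervals = list()
-- 	zero_count = 0
-- 	for d in data:
-- 		if d == 0: zero_count += 1
-- 		else:
-- 			zero_intervals.append(zero_count)
-- 			zero_count = 0
-- 	return zero_intervals
-- ===== SOURCE B (Python) =====
-- def get_zero_intervals(data):
--     idxs = [i for i, d in enumerate(data) if not (d == 0)]
--     res = []
--     prev = -1
--     for i in idxs:
--         res.append(i - prev - 1)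
--         prev = i
--     return res
-- ===== Notes on version B (the rewrite author's own statement) =====
-- stated objective: alternative
-- what changed: B first collects the indices of all nonzero elements, then emits the gap between consecutive nonzero indices (with a -1 sentinel), instead of A's single pass carrying a running zero counter that is appended and reset at each nonzero.
import Mathlib
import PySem

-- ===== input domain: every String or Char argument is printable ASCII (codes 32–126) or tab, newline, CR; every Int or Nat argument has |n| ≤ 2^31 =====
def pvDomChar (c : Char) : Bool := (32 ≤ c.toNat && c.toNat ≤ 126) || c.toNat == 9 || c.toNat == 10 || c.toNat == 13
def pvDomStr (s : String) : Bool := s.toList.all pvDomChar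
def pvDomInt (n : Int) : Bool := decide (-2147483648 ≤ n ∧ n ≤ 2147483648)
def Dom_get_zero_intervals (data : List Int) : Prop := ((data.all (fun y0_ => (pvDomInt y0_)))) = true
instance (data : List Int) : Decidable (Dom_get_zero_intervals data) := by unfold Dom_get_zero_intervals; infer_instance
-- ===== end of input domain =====

-- B collects the indices of nonzero elements and emits gaps between consecutive ones (alternative decomposition, same cost).


-- ===== PORT A =====
def get_zero_intervals (data : List Int) : List Int :=
  (data.foldl (fun (s : List Int × Int) d =>
      if d == 0 then (s.1, s.2 + 1) else (s.1 ++ [s.2], 0)) ([], 0)).1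

-- ===== PORT B =====
def get_zero_intervals_alt (data : List Int) : List Int :=
  let idxs : List Int :=
    ((PySem.List.enumerate data).filter (fun p => !(p.2 == 0))).map (fun p => p.1)
  (idxs.foldl (fun (s : List Int × Int) i => (s.1 ++ [i - s.2 - 1], i)) ([], -1)).1

-- ===== PRECONDITION & SPEC =====
def Spec_get_zero_intervals (data : List Int) (out : List Int) : Prop := out = get_zero_intervals_alt data
instance (data : List Int) (out : List Int) : Decidable (Spec_get_zero_intervals data out) := by unfold Spec_get_zero_intervals; infer_instance

-- ===== CLAIM (what is proved, stated in full; the proofs are below) =====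
def Claim_equal_get_zero_intervals : Prop := ∀ (data : List Int), Dom_get_zero_intervals data → Spec_get_zero_intervals data (get_zero_intervals data)

-- ===== LEMMAS AND PROOFS =====

-- common specification: zero-run lengths before each nonzero, with c zeros already pending
def pvRuns (c : Int) : List Int → List Int
  | [] => []
  | d :: t => if d = 0 then pvRuns (c + 1) t else c :: pvRuns 0 t

theorem pvA_fold (t : List Int) : ∀ (acc : List Int) (c : Int),
    (t.foldl (fun (s : List Int × Int) d =>
        if d == 0 then (s.1, s.2 + 1) else (s.1 ++ [s.2], 0)) (acc, c)).1
      = acc ++ pvRuns c t := by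
  induction t with
  | nil => intro acc c; simp [pvRuns]
  | cons d t ih =>
    intro acc c
    rw [List.foldl_cons]
    by_cases h : d = 0
    · have hb : (d == 0) = true := by simp [h]
      rw [hb]; simp only [if_true]
      rw [ih]; simp [pvRuns, h]
    · have hb : (d == 0) = false := by simp [h]
      rw [hb]; simp only [Bool.false_eq_true, if_false]
      rw [ih]; simp [pvRuns, h]

theorem pvB_fold (t : List Int) : ∀ (n : Int) (acc : List Int) (prev : Int),
    ((((PySem.List.enumerate t n).filter (fun p => !(p.2 == 0))).map (fun p => p.1)).foldl
        (fun (s : List Int × Int) i => (s.1 ++ [i - s.2 - 1], i)) (acc, prev)).1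
      = acc ++ pvRuns (n - prev - 1) t := by
  induction t with
  | nil => intro n acc prev; simp [PySem.List.enumerate_nil, pvRuns]
  | cons d t ih =>
    intro n acc prev
    by_cases h : d = 0
    · have : n + 1 - prev - 1 = (n - prev - 1) + 1 := by ring
      simp [PySem.List.enumerate_cons, h, pvRuns, ih, this]
    · have : n + 1 - n - 1 = (0 : Int) := by ring
      simp [PySem.List.enumerate_cons, h, pvRuns, ih, List.append_assoc]

-- ===== VERDICT (by name: the statement is the Claim_ definition above) =====
theorem get_zero_intervals_spec : Claim_equal_get_zero_intervals := by
  intro data _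
  unfold Spec_get_zero_intervals get_zero_intervals get_zero_intervals_alt
  rw [pvA_fold, pvB_fold]
  norm_num
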